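-- pv_equiv track=rewrite | github.com/0xFannie/gmt-pay-dashboard | dashboard_v3_dynamic.py | get_chain_color_map
-- ===== SOURCE A (Python) =====
-- CHAIN_COLORS = {
--     'ethereum': {
--         'color': '#627EEA',  # 以太坊蓝
--         'bg': 'rgba(98, 126, 234, 0.1)',
--         'border': 'rgba(98, 126, 234, 0.3)'
--     },
--     'bnb chain': {
--         'color': '#F3BA2F',  # 币安金色
--         'bg': 'rgba(243, 186, 47, 0.1)',
--         'border': 'rgba(243, 186, 47, 0.3)'
--     },
--     'polygon': {
--         'color': '#8247E5',  # Polygon紫色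
--         'bg': 'rgba(130, 71, 229, 0.1)',
--         'border': 'rgba(130, 71, 229, 0.3)'
--     },
--     'solana': {
--         'color': '#14F195',  # Solana青绿色
--         'gradient': 'linear-gradient(135deg, #9945FF 0%, #14F195 100%)',  # Solana渐变
--         'bg': 'rgba(20, 241, 149, 0.1)',
--         'border': 'rgba(20, 241, 149, 0.3)'
--     }
-- }
--
-- def get_chain_color_map(chains):
--     """为给定的链列表生成颜色映射"""
--     color_map = {}
--     for chain in chains:
--         chain_lower = chain.lower()
--         if chain_lower in CHAIN_COLORS:
--             color_map[chain] = CHAIN_COLORS[chain_lower]['color']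
--         elif 'bnb' in chain_lower or 'bsc' in chain_lower:
--             color_map[chain] = CHAIN_COLORS['bnb chain']['color']
--         elif 'polygon' in chain_lower:
--             color_map[chain] = CHAIN_COLORS['polygon']['color']
--         elif 'ethereum' in chain_lower or 'eth' in chain_lower:
--             color_map[chain] = CHAIN_COLORS['ethereum']['color']
--         elif 'solana' in chain_lower or 'sol' in chain_lower:
--             color_map[chain] = CHAIN_COLORS['solana']['color']
--         else:
--             color_map[chain] = '#5B93FF'
--     return color_map
-- ===== SOURCE B (Python) =====
-- # Key observation: every exact key in CHAIN_COLORS is itself matched (with the same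
-- # color) by a substring rule, so the exact-match stage of A is redundant; and the
-- # color depends only on the chain string, so duplicates can be removed up front.
-- # B therefore classifies each distinct chain by one flat scan of five keywords.
-- _KEYWORD_COLORS = [
--     ('bnb', '#F3BA2F'),
--     ('bsc', '#F3BA2F'),
--     ('polygon', '#8247E5'),
--     ('eth', '#627EEA'),   # also covers 'ethereum'
--     ('sol', '#14F195'),   # also covers 'solana'
-- ]
-- _DEFAULT = '#5B93FF'
--
--
-- def get_chain_color_map(chains):
--     """为给定的链列表生成颜色映射"""
--     color_map = {}
--     for chain in dict.fromkeys(chains):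
--         cl = chain.lower()
--         color_map[chain] = next((color for kw, color in _KEYWORD_COLORS if kw in cl), _DEFAULT)
--     return color_map
-- ===== Notes on version B (the rewrite author's own statement) =====
-- stated objective: simpler
-- what changed: B drops A's exact-name dict lookup entirely (every exact key is subsumed, with the same color, by a substring keyword) and merges 'ethereum'/'solana' into 'eth'/'sol', classifying each chain by one flat scan of five keywords; it also deduplicates the input with dict.fromkeys before the loop since the color depends only on the chain string.
import Mathlib
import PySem

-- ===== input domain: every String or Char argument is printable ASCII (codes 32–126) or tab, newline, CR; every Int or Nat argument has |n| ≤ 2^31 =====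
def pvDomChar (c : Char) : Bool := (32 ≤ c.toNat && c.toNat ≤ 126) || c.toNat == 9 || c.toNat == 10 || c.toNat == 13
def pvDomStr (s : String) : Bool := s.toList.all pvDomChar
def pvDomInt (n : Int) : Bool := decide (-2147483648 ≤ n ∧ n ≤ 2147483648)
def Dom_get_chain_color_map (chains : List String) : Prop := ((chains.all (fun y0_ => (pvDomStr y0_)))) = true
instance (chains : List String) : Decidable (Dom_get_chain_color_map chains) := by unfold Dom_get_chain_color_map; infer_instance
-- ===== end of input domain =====

-- B drops A's exact-name dict lookup (each exact key is subsumed, same color, by a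
-- substring keyword), classifies each chain by one flat scan of five keywords, and
-- deduplicates the input up front (objective: simpler).

-- ===== PORT A =====
-- CHAIN_COLORS as a dict of dicts (only string-valued entries; exact for the keys A reads)
def pvCHAIN_COLORS : PySem.Dict String (PySem.Dict String String) :=
  PySem.Dict.mk [
    ("ethereum", PySem.Dict.mk [("color", "#627EEA"), ("bg", "rgba(98, 126, 234, 0.1)"), ("border", "rgba(98, 126, 234, 0.3)")]),
    ("bnb chain", PySem.Dict.mk [("color", "#F3BA2F"), ("bg", "rgba(243, 186, 47, 0.1)"), ("border", "rgba(243, 186, 47, 0.3)")]),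
    ("polygon", PySem.Dict.mk [("color", "#8247E5"), ("bg", "rgba(130, 71, 229, 0.1)"), ("border", "rgba(130, 71, 229, 0.3)")]),
    ("solana", PySem.Dict.mk [("color", "#14F195"), ("gradient", "linear-gradient(135deg, #9945FF 0%, #14F195 100%)"), ("bg", "rgba(20, 241, 149, 0.1)"), ("border", "rgba(20, 241, 149, 0.3)")])]

-- CHAIN_COLORS[k]['color'] for a key known to be present (A only indexes after the
-- membership check or with the literal keys above, so the getD defaults are never reached)
def pvColorOf (k : String) : String :=
  ((pvCHAIN_COLORS.get? k).getD PySem.Dict.empty).getD "color" ""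

def get_chain_color_map (chains : List String) : List (String × String) :=
  (chains.foldl (fun (color_map : PySem.Dict String String) chain =>
    let chain_lower := PySem.Str.lower chain
    if pvCHAIN_COLORS.contains chain_lower then
      color_map.insert chain (pvColorOf chain_lower)
    else if PySem.Str.isIn "bnb" chain_lower || PySem.Str.isIn "bsc" chain_lower then
      color_map.insert chain (pvColorOf "bnb chain")
    else if PySem.Str.isIn "polygon" chain_lower then
      color_map.insert chain (pvColorOf "polygon")
    else if PySem.Str.isIn "ethereum" chain_lower || PySem.Str.isIn "eth" chain_lower then
      color_map.insert chain (pvColorOf "ethereum")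
    else if PySem.Str.isIn "solana" chain_lower || PySem.Str.isIn "sol" chain_lower then
      color_map.insert chain (pvColorOf "solana")
    else
      color_map.insert chain "#5B93FF") PySem.Dict.empty).items

-- ===== PORT B =====
-- _KEYWORD_COLORS: flat ordered keyword table, first match wins
def pvKEYWORD_COLORS : List (String × String) :=
  [("bnb", "#F3BA2F"), ("bsc", "#F3BA2F"), ("polygon", "#8247E5"),
   ("eth", "#627EEA"), ("sol", "#14F195")]

def pvDEFAULT : String := "#5B93FF"

-- next((color for kw, color in _KEYWORD_COLORS if kw in cl), _DEFAULT)
def pvFlatColor (cl : String) : String :=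
  match pvKEYWORD_COLORS.find? (fun p => PySem.Str.isIn p.1 cl) with
  | some p => p.2
  | none => pvDEFAULT

def get_chain_color_map_alt (chains : List String) : List (String × String) :=
  ((PySem.List.dedup chains).foldl (fun (color_map : PySem.Dict String String) chain =>
    color_map.insert chain (pvFlatColor (PySem.Str.lower chain))) PySem.Dict.empty).items

-- ===== PRECONDITION & SPEC =====
def Spec_get_chain_color_map (chains : List String) (out : List (String × String)) : Prop := out = get_chain_color_map_alt chains
instance (chains : List String) (out : List (String × String)) : Decidable (Spec_get_chain_color_map chains out) := by unfold Spec_get_chain_color_map; infer_instance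

-- ===== CLAIM (what is proved, stated in full; the proofs are below) =====
def Claim_equal_get_chain_color_map : Prop := ∀ (chains : List String), Dom_get_chain_color_map chains → Spec_get_chain_color_map chains (get_chain_color_map chains)

-- ===== LEMMAS AND PROOFS =====

-- "ethereum" in cl implies "eth" in cl (infix through the prefix "eth" of "ethereum")
theorem isIn_eth_of_isIn_ethereum (cl : String) (h : PySem.Str.isIn "ethereum" cl = true) :
    PySem.Str.isIn "eth" cl = true := by
  rw [PySem.Str.isIn_iff_infix] at h ⊢
  exact List.IsInfix.trans (by decide) h

-- "solana" in cl implies "sol" in cl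
theorem isIn_sol_of_isIn_solana (cl : String) (h : PySem.Str.isIn "solana" cl = true) :
    PySem.Str.isIn "sol" cl = true := by
  rw [PySem.Str.isIn_iff_infix] at h ⊢
  exact List.IsInfix.trans (by decide) h

-- the per-chain color computed by A's cascade equals B's flat keyword scan
theorem color_step_eq (cl : String) :
    (if pvCHAIN_COLORS.contains cl then pvColorOf cl
     else if PySem.Str.isIn "bnb" cl || PySem.Str.isIn "bsc" cl then pvColorOf "bnb chain"
     else if PySem.Str.isIn "polygon" cl then pvColorOf "polygon"
     else if PySem.Str.isIn "ethereum" cl || PySem.Str.isIn "eth" cl then pvColorOf "ethereum"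
     else if PySem.Str.isIn "solana" cl || PySem.Str.isIn "sol" cl then pvColorOf "solana"
     else "#5B93FF") = pvFlatColor cl := by
  by_cases h1 : cl = "ethereum"
  · subst h1; decide
  by_cases h2 : cl = "bnb chain"
  · subst h2; decide
  by_cases h3 : cl = "polygon"
  · subst h3; decide
  by_cases h4 : cl = "solana"
  · subst h4; decide
  have hcf : pvCHAIN_COLORS.contains cl = false := by
    simp [pvCHAIN_COLORS, PySem.Dict.contains]
    exact ⟨fun h => h1 h.symm, fun h => h2 h.symm, fun h => h3 h.symm, fun h => h4 h.symm⟩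
  have cb : pvColorOf "bnb chain" = "#F3BA2F" := by decide
  have cp : pvColorOf "polygon" = "#8247E5" := by decide
  have ce : pvColorOf "ethereum" = "#627EEA" := by decide
  have cs : pvColorOf "solana" = "#14F195" := by decide
  rw [hcf]
  simp only [pvFlatColor, pvKEYWORD_COLORS, pvDEFAULT, List.find?]
  cases hA : PySem.Str.isIn "bnb" cl <;> cases hB : PySem.Str.isIn "bsc" cl <;>
    cases hC : PySem.Str.isIn "polygon" cl <;>
    cases hD : PySem.Str.isIn "ethereum" cl <;> cases hE : PySem.Str.isIn "eth" cl <;>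
    cases hF : PySem.Str.isIn "solana" cl <;> cases hG : PySem.Str.isIn "sol" cl
  all_goals try exact absurd (isIn_eth_of_isIn_ethereum cl hD) (by intro h; rw [h] at hE; exact Bool.noConfusion hE)
  all_goals try exact absurd (isIn_sol_of_isIn_solana cl hF) (by intro h; rw [h] at hG; exact Bool.noConfusion hG)
  all_goals simp_all

-- folding 'insert chain (f chain)' over a list builds exactly the dedup of the list
-- paired with its colors, regardless of duplicates (re-inserting an equal value is a no-op)
theorem items_foldl_insert_color (f : String → String) (xs : List String) :
    ((xs.foldl (fun (d : PySem.Dict String String) c => d.insert c (f c))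
      PySem.Dict.empty).items) = (PySem.List.dedup xs).map (fun c => (c, f c)) := by
  induction xs using List.reverseRecOn with
  | nil => rfl
  | append_singleton xs x ih =>
    rw [List.foldl_append]
    simp only [List.foldl_cons, List.foldl_nil]
    have hkeys : (xs.foldl (fun (d : PySem.Dict String String) c => d.insert c (f c))
        PySem.Dict.empty).contains x = decide (x ∈ xs) := by
      rw [PySem.Dict.contains_eq_decide_mem_keys, PySem.Dict.keys_foldl_insert]
      simp [PySem.Set.update, PySem.Dict.keys_empty, ← PySem.Set.ofList_eq_foldl,
        PySem.Set.mem_ofList]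
    have hded : PySem.List.dedup (xs ++ [x]) =
        if x ∈ xs then PySem.List.dedup xs else PySem.List.dedup xs ++ [x] := by
      simp only [PySem.List.dedup_eq_ofList, PySem.Set.ofList_eq_foldl, List.foldl_append,
        List.foldl_cons, List.foldl_nil, PySem.Set.add]
      rw [← PySem.Set.ofList_eq_foldl]
      by_cases hx : x ∈ xs
      · simp [PySem.Set.contains, PySem.Set.mem_ofList, hx]
      · simp [PySem.Set.contains, PySem.Set.mem_ofList, hx]
    by_cases hx : x ∈ xs
    · rw [PySem.Dict.items_insert_of_contains _ _ (by simp [hkeys, hx]), ih, hded]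
      simp only [hx, if_true, List.map_map]
      apply List.map_congr_left
      intro c _
      by_cases hc : c = x <;> simp [hc]
    · rw [PySem.Dict.items_insert_of_not_contains _ _ (by simp [hkeys, hx]), ih, hded]
      simp [hx]

-- dedup is idempotent
theorem dedup_dedup (xs : List String) :
    PySem.List.dedup (PySem.List.dedup xs) = PySem.List.dedup xs := by
  simp only [PySem.List.dedup_eq_ofList]
  exact PySem.Set.ofList_eq_self_of_nodup _ (PySem.Set.nodup_ofList xs)

-- ===== VERDICT (by name: the statement is the Claim_ definition above) =====
theorem get_chain_color_map_spec : Claim_equal_get_chain_color_map := by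
  intro chains _
  show get_chain_color_map chains = get_chain_color_map_alt chains
  unfold get_chain_color_map get_chain_color_map_alt
  have hstep : ∀ (d : PySem.Dict String String) (chain : String),
      (let chain_lower := PySem.Str.lower chain
       if pvCHAIN_COLORS.contains chain_lower then
         d.insert chain (pvColorOf chain_lower)
       else if PySem.Str.isIn "bnb" chain_lower || PySem.Str.isIn "bsc" chain_lower then
         d.insert chain (pvColorOf "bnb chain")
       else if PySem.Str.isIn "polygon" chain_lower then
         d.insert chain (pvColorOf "polygon")
       else if PySem.Str.isIn "ethereum" chain_lower || PySem.Str.isIn "eth" chain_lower then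
         d.insert chain (pvColorOf "ethereum")
       else if PySem.Str.isIn "solana" chain_lower || PySem.Str.isIn "sol" chain_lower then
         d.insert chain (pvColorOf "solana")
       else d.insert chain "#5B93FF")
      = d.insert chain (pvFlatColor (PySem.Str.lower chain)) := by
    intro d chain
    rw [← color_step_eq (PySem.Str.lower chain)]
    simp only []
    split_ifs <;> rfl
  calc (chains.foldl (fun (color_map : PySem.Dict String String) chain =>
          let chain_lower := PySem.Str.lower chain
          if pvCHAIN_COLORS.contains chain_lower then
            color_map.insert chain (pvColorOf chain_lower)
          else if PySem.Str.isIn "bnb" chain_lower || PySem.Str.isIn "bsc" chain_lower then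
            color_map.insert chain (pvColorOf "bnb chain")
          else if PySem.Str.isIn "polygon" chain_lower then
            color_map.insert chain (pvColorOf "polygon")
          else if PySem.Str.isIn "ethereum" chain_lower || PySem.Str.isIn "eth" chain_lower then
            color_map.insert chain (pvColorOf "ethereum")
          else if PySem.Str.isIn "solana" chain_lower || PySem.Str.isIn "sol" chain_lower then
            color_map.insert chain (pvColorOf "solana")
          else color_map.insert chain "#5B93FF") PySem.Dict.empty).items
      = (chains.foldl (fun (d : PySem.Dict String String) chain =>
          d.insert chain (pvFlatColor (PySem.Str.lower chain))) PySem.Dict.empty).items := by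
        congr 2
        funext d c
        exact hstep d c
    _ = (PySem.List.dedup chains).map
          (fun c => (c, pvFlatColor (PySem.Str.lower c))) := by
        exact items_foldl_insert_color (fun c => pvFlatColor (PySem.Str.lower c)) chains
    _ = ((PySem.List.dedup chains).foldl (fun (d : PySem.Dict String String) chain =>
          d.insert chain (pvFlatColor (PySem.Str.lower chain))) PySem.Dict.empty).items := by
        rw [items_foldl_insert_color, dedup_dedup]
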